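-- pv_equiv track=rewrite | github.com/Shvoeva/Exercise8 | 5.AgeOfGhosts/main.py | degree_of_transparency
-- ===== SOURCE A (Python) =====
-- max_transparency = 10000
--
-- def degree_of_transparency(n):
--     transparency = max_transparency
--     fibonacci_number1, fibonacci_number2 = 1, 1
--
--     yield transparency, 0
--     for age in range(1, n):
--         if age == fibonacci_number2:
--             transparency -= fibonacci_number2
--             fibonacci_number1, fibonacci_number2 = \
--                 fibonacci_number2, fibonacci_number1 + fibonacci_number2
--         else:
--             transparency += 1
--         yield transparency, age
-- ===== SOURCE B (Python) =====
-- def degree_of_transparency(n):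
--     yield 10000, 0
--     for age in range(1, n):
--         # closed-form per age: transparency = 10000 + (non-fib ages <= age) - (sum of fib ages <= age)
--         count, total, f1, f2 = 0, 0, 1, 1
--         while f2 <= age:
--             count += 1
--             total += f2
--             f1, f2 = f2, f1 + f2
--         yield 10000 + (age - count) - total, age
-- ===== Notes on version B (the rewrite author's own statement) =====
-- stated objective: alternative
-- what changed: Replaced A's single stateful pass (a running transparency plus a carried Fibonacci pair updated per age) by a memoryless per-age closed-form: each output element is computed independently as the maximum transparency plus the number of non-Fibonacci ages up to that age minus the sum of the Fibonacci ages up to it, recomputed from scratch for every age.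
import Mathlib
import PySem

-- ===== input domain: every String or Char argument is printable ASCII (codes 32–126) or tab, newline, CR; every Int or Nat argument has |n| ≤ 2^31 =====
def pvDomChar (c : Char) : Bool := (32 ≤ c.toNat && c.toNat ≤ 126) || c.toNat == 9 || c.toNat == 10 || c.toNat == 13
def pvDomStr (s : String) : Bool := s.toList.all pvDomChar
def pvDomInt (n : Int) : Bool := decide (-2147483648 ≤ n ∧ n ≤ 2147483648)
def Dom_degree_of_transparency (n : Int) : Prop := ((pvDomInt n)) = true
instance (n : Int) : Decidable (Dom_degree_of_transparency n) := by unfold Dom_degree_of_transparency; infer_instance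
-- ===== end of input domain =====

-- B replaces A's single stateful pass (running transparency + carried Fibonacci pair) by a
-- memoryless per-age closed-form value recomputed from scratch (objective: alternative).
-- Both Pythons are generators; the ports return the list of yielded pairs.

-- ===== PORT A =====
-- A's for-loop over range(1, n), one age at a time, accumulating the yielded pairs.
def pvLoopA (t f1 f2 : Int) (acc : List (Int × Int)) (ages : List Int) : List (Int × Int) :=
  match ages with
  | [] => acc
  | age :: rest =>
    if age = f2 then
      pvLoopA (t - f2) f2 (f1 + f2) (acc ++ [(t - f2, age)]) rest
    else
      pvLoopA (t + 1) f1 f2 (acc ++ [(t + 1, age)]) rest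

def degree_of_transparency (n : Int) : List (Int × Int) :=
  pvLoopA 10000 1 1 [(10000, 0)] (PySem.List.pyRange 1 n 1)

-- ===== PORT B =====
-- B's inner while: count and sum of the Fibonacci ages ≤ age; fuel = age.toNat + 1 only
-- makes the while total (f2 grows by at least 1 each round, so the guard fails first).
def pvCS (fuel : Nat) (c s f1 f2 age : Int) : Int × Int :=
  match fuel with
  | 0 => (c, s)
  | fuel + 1 =>
    if f2 ≤ age then pvCS fuel (c + 1) (s + f2) f2 (f1 + f2) age else (c, s)

def degree_of_transparency_alt (n : Int) : List (Int × Int) :=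
  (10000, 0) ::
    (PySem.List.pyRange 1 n 1).map (fun age =>
      let cs := pvCS (age.toNat + 1) 0 0 1 1 age
      (10000 + (age - cs.1) - cs.2, age))

-- ===== PRECONDITION & SPEC =====
def Spec_degree_of_transparency (n : Int) (out : List (Int × Int)) : Prop := out = degree_of_transparency_alt n
instance (n : Int) (out : List (Int × Int)) : Decidable (Spec_degree_of_transparency n out) := by unfold Spec_degree_of_transparency; infer_instance

-- ===== CLAIM (what is proved, stated in full; the proofs are below) =====
def Claim_equal_degree_of_transparency : Prop := ∀ (n : Int), Dom_degree_of_transparency n → Spec_degree_of_transparency n (degree_of_transparency n)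

-- ===== LEMMAS AND PROOFS =====

-- Fuel-free version of B's inner while, for the proofs.
def pvCSrun (c s f1 f2 age : Int) : Int × Int :=
  if _h : f2 ≤ age ∧ 1 ≤ f1 then pvCSrun (c + 1) (s + f2) f2 (f1 + f2) age else (c, s)
termination_by (age + 1 - f2).toNat
decreasing_by omega

theorem pvCS_eq_run (fuel : Nat) (c s f1 f2 age : Int)
    (h1 : 1 ≤ f1) (h2 : f1 ≤ f2) (hf : age + 1 ≤ f2 + fuel) :
    pvCS fuel c s f1 f2 age = pvCSrun c s f1 f2 age := by
  induction fuel generalizing c s f1 f2 with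
  | zero =>
    rw [pvCSrun]
    simp only [pvCS]
    rw [dif_neg (by omega)]
  | succ fuel ih =>
    rw [pvCSrun]
    simp only [pvCS]
    by_cases hle : f2 ≤ age
    · rw [if_pos hle, dif_pos ⟨hle, h1⟩]
      exact ih _ _ _ _ (by omega) (by omega) (by omega)
    · rw [if_neg hle, dif_neg (by omega)]

-- Main invariant: A's flat stateful loop from age a equals the map of B's closed form,
-- where (c0, s0) is the ghost count/sum of Fibonacci ages below a and t the carried value.
theorem pvLoopA_eq_map (m : Nat) (a n t f1 f2 c0 s0 : Int) (acc : List (Int × Int))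
    (hm : (n - a).toNat = m) (h1 : 1 ≤ f1) (h2 : f1 ≤ f2) (h3 : a ≤ f2)
    (ht : t = 10000 + ((a - 1) - c0) - s0)
    (hcs : ∀ x, a ≤ x → pvCSrun 0 0 1 1 x = pvCSrun c0 s0 f1 f2 x) :
    pvLoopA t f1 f2 acc (PySem.List.pyRange a n 1) =
      acc ++ (PySem.List.pyRange a n 1).map (fun x =>
        (10000 + (x - (pvCSrun 0 0 1 1 x).1) - (pvCSrun 0 0 1 1 x).2, x)) := by
  induction m generalizing a t f1 f2 c0 s0 acc with
  | zero =>
    rw [PySem.List.pyRange_one_eq_nil (by omega)]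
    simp [pvLoopA]
  | succ m ih =>
    by_cases hlt : a < n
    · rw [PySem.List.pyRange_one_cons hlt]
      simp only [pvLoopA, List.map_cons]
      by_cases hfib : a = f2
      · rw [if_pos hfib]
        have hstep : pvCSrun c0 s0 f1 f2 a = (c0 + 1, s0 + f2) := by
          rw [pvCSrun, dif_pos ⟨by omega, h1⟩, pvCSrun, dif_neg (by omega)]
        have hval : pvCSrun 0 0 1 1 a = (c0 + 1, s0 + f2) := by
          rw [hcs a le_rfl, hstep]
        rw [ih (a + 1) (t - f2) f2 (f1 + f2) (c0 + 1) (s0 + f2) _ (by omega)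
          (by omega) (by omega) (by omega) (by omega)
          (by
            intro x hx
            rw [hcs x (by omega), pvCSrun, dif_pos ⟨by omega, h1⟩])]
        simp [hval, List.append_assoc]
        omega
      · rw [if_neg hfib]
        have hval : pvCSrun 0 0 1 1 a = (c0, s0) := by
          rw [hcs a le_rfl, pvCSrun, dif_neg (by omega)]
        rw [ih (a + 1) (t + 1) f1 f2 c0 s0 _ (by omega) h1 h2 (by omega) (by omega)
          (fun x hx => hcs x (by omega))]
        simp [hval, List.append_assoc]
        omega
    · rw [PySem.List.pyRange_one_eq_nil (by omega)]
      simp only [pvLoopA, List.map_nil, List.append_nil]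

-- ===== VERDICT (by name: the statement is the Claim_ definition above) =====
theorem degree_of_transparency_spec : Claim_equal_degree_of_transparency := by
  intro n _
  unfold Spec_degree_of_transparency degree_of_transparency degree_of_transparency_alt
  rw [pvLoopA_eq_map (n - 1).toNat 1 n 10000 1 1 0 0 _ (by omega) le_rfl le_rfl le_rfl
    (by omega) (fun x _ => rfl)]
  simp only [List.cons_append, List.nil_append]
  congr 1
  apply List.map_congr_left
  intro x hx
  have hmem := (PySem.List.mem_pyRange_one).mp hx
  rw [pvCS_eq_run _ _ _ _ _ _ le_rfl le_rfl (by omega)]
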